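-- pv_equiv track=rewrite | github.com/taraslysun/hip-prosthesis-sizer | segmentator.py | get_head_edge_points
-- ===== SOURCE A (Python) =====
-- def get_head_edge_points(head_segm_results):
--     res = []
--     for result in head_segm_results:
--         for point in result['points']:
--             res.append((point['x'], point['y']))
--     max_right = max(res, key=lambda x: x[0])
--     max_left = min(res, key=lambda x: x[0])
--     return max_left, max_right
-- ===== SOURCE B (Python) =====
-- def get_head_edge_points(head_segm_results):
--     max_left = max_right = None
--     for result in head_segm_results:
--         for point in result['points']:
--             pt = (point['x'], point['y'])
--             if max_left is None:
--                 max_left = max_right = pt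
--             else:
--                 if pt[0] < max_left[0]:
--                     max_left = pt
--                 if max_right[0] < pt[0]:
--                     max_right = pt
--     if max_left is None:
--         raise ValueError("no points")
--     return max_left, max_right
-- ===== Notes on version B (the rewrite author's own statement) =====
-- stated objective: simpler
-- what changed: B replaces A's build-a-list-then-three-passes (append loop plus max(...) plus min(...)) with a single pass that maintains the running leftmost/rightmost points, allocating no intermediate list; strict comparisons preserve A's first-occurrence tie-breaking.
import Mathlib
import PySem

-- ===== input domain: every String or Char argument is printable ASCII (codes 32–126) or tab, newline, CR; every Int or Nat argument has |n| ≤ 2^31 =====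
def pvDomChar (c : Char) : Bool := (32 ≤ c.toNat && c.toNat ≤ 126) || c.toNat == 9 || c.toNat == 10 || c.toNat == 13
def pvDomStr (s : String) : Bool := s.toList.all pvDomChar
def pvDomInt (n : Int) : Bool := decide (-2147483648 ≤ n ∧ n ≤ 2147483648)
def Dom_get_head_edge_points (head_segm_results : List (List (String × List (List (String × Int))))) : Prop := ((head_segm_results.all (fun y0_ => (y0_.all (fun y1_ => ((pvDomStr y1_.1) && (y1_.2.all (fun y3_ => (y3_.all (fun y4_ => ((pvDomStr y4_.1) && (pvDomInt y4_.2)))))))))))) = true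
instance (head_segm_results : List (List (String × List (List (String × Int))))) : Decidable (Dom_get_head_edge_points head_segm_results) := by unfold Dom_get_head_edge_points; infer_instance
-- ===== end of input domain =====

-- B does one pass keeping the running leftmost/rightmost point instead of building a list and scanning it twice with min/max.
-- Equivalence is about the RETURN value; neither version mutates its argument.

-- dict[k]: first-match association-list lookup (Python dict access)
def pvLookup {α : Type} (d : List (String × α)) (k : String) : Option α :=
  (d.find? (fun p => p.1 == k)).map (·.2)

-- ===== PORT A =====
def get_head_edge_points (head_segm_results : List (List (String × List (List (String × Int))))) : (Int × Int) × (Int × Int) :=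
  let res := head_segm_results.foldl (fun acc result =>
      ((pvLookup result "points").getD []).foldl
        (fun acc point => acc ++ [((pvLookup point "x").getD 0, (pvLookup point "y").getD 0)]) acc) []
  match PySem.List.max? res (fun p => p.1), PySem.List.min? res (fun p => p.1) with
  | some max_right, some max_left => (max_left, max_right)
  | _, _ => ((0, 0), (0, 0))   -- unreachable under Pre_ (Python raises ValueError on empty res)

-- ===== PORT B =====
-- running state: none = no point seen yet; some (max_left, max_right)
def pvStep (st : Option ((Int × Int) × (Int × Int))) (pt : Int × Int) : Option ((Int × Int) × (Int × Int)) :=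
  match st with
  | none => some (pt, pt)
  | some (ml, mr) => some ((if pt.1 < ml.1 then pt else ml), (if mr.1 < pt.1 then pt else mr))

def get_head_edge_points_alt (head_segm_results : List (List (String × List (List (String × Int))))) : (Int × Int) × (Int × Int) :=
  let st := head_segm_results.foldl (fun st result =>
      ((pvLookup result "points").getD []).foldl
        (fun st point => pvStep st ((pvLookup point "x").getD 0, (pvLookup point "y").getD 0)) st) none
  match st with
  | some (ml, mr) => (ml, mr)
  | none => ((0, 0), (0, 0))   -- unreachable under Pre_ (Python raises ValueError)

-- ===== PRECONDITION & SPEC =====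
-- Pre_ excludes exactly the inputs where Python A raises: a result without a 'points' key or a
-- point without an 'x'/'y' key (KeyError), and inputs with no points at all (max([]) raises ValueError).
def Pre_get_head_edge_points (head_segm_results : List (List (String × List (List (String × Int))))) : Prop :=
  (head_segm_results.all (fun r =>
      match pvLookup r "points" with
      | some pts => pts.all (fun p => ((pvLookup p "x").isSome && (pvLookup p "y").isSome))
      | none => false)) = true
  ∧ (head_segm_results.any (fun r => !((pvLookup r "points").getD []).isEmpty)) = true

instance (head_segm_results : List (List (String × List (List (String × Int))))) : Decidable (Pre_get_head_edge_points head_segm_results) := by unfold Pre_get_head_edge_points; infer_instance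

def pvWitness_get_head_edge_points : (List (List (String × List (List (String × Int))))) :=
  [[("points", [[("x", 1), ("y", 2)], [("x", -3), ("y", 0)]])]]

def Spec_get_head_edge_points (head_segm_results : List (List (String × List (List (String × Int))))) (out : (Int × Int) × (Int × Int)) : Prop := out = get_head_edge_points_alt head_segm_results
instance (head_segm_results : List (List (String × List (List (String × Int))))) (out : (Int × Int) × (Int × Int)) : Decidable (Spec_get_head_edge_points head_segm_results out) := by unfold Spec_get_head_edge_points; infer_instance

-- ===== CLAIM (what is proved, stated in full; the proofs are below) =====
def Claim_equal_get_head_edge_points : Prop := ∀ (head_segm_results : List (List (String × List (List (String × Int))))), Dom_get_head_edge_points head_segm_results → Pre_get_head_edge_points head_segm_results → Spec_get_head_edge_points head_segm_results (get_head_edge_points head_segm_results)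

-- ===== LEMMAS AND PROOFS =====

-- a nested foldl over results/points is a foldl over the flattened point list
theorem pv_nested_foldl {σ ρ π : Type} (hs : List ρ) (pts : ρ → List π) (g : σ → π → σ) (s0 : σ) :
    hs.foldl (fun s r => (pts r).foldl g s) s0 = (hs.flatMap pts).foldl g s0 := by
  induction hs generalizing s0 with
  | nil => rfl
  | cons h t ih => simp [List.flatMap_cons, List.foldl_append, ih]

-- A's append loop builds acc0 ++ map
theorem pv_append_foldl {π β : Type} (L : List π) (mk : π → β) (acc0 : List β) :
    L.foldl (fun acc p => acc ++ [mk p]) acc0 = acc0 ++ L.map mk := by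
  induction L generalizing acc0 with
  | nil => simp
  | cons h t ih => simp [ih]

-- B's combined step, started from a seen pair, is the pair of running-min and running-max folds
theorem pv_step_some (L : List (Int × Int)) (ml mr : Int × Int) :
    L.foldl pvStep (some (ml, mr)) =
      some (L.foldl (fun m x => if x.1 < m.1 then x else m) ml,
            L.foldl (fun m x => if m.1 < x.1 then x else m) mr) := by
  induction L generalizing ml mr with
  | nil => rfl
  | cons h t ih => simp [List.foldl_cons, pvStep, ih]

-- a foldl that starts from 'some' and stays in 'some' is the option-wrapping of a plain foldl
theorem pv_opt_fold {α : Type} (f : Option α → α → Option α) (g : α → α → α)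
    (hf : ∀ m x, f (some m) x = some (g m x)) (L : List α) (m : α) :
    L.foldl f (some m) = some (L.foldl g m) := by
  induction L generalizing m with
  | nil => rfl
  | cons h t ih => rw [List.foldl_cons, hf, List.foldl_cons, ih]

theorem pv_min?_cons (pt : Int × Int) (t : List (Int × Int)) :
    PySem.List.min? (pt :: t) (fun p => p.1) =
      some (t.foldl (fun m x => if x.1 < m.1 then x else m) pt) := by
  unfold PySem.List.min?
  rw [List.foldl_cons]
  exact pv_opt_fold _ _ (fun m x => by by_cases hc : x.1 < m.1 <;> simp [hc]) t pt

theorem pv_max?_cons (pt : Int × Int) (t : List (Int × Int)) :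
    PySem.List.max? (pt :: t) (fun p => p.1) =
      some (t.foldl (fun m x => if m.1 < x.1 then x else m) pt) := by
  unfold PySem.List.max?
  rw [List.foldl_cons]
  exact pv_opt_fold _ _ (fun m x => by by_cases hc : m.1 < x.1 <;> simp [hc]) t pt

-- ===== VERDICT (by name: the statement is the Claim_ definition above) =====
theorem get_head_edge_points_spec : Claim_equal_get_head_edge_points := by
  intro hs _ _
  unfold Spec_get_head_edge_points get_head_edge_points get_head_edge_points_alt
  rw [pv_nested_foldl, pv_nested_foldl, pv_append_foldl, List.nil_append,
      ← List.foldl_map (f := fun point : List (String × Int) =>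
        ((pvLookup point "x").getD 0, (pvLookup point "y").getD 0)) (g := pvStep)]
  cases hL : (hs.flatMap (fun r => (pvLookup r "points").getD [])).map
      (fun point => ((pvLookup point "x").getD 0, (pvLookup point "y").getD 0)) with
  | nil => rfl
  | cons pt t =>
      dsimp only
      rw [pv_max?_cons, pv_min?_cons]
      simp only [List.foldl_cons, pvStep, pv_step_some]
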